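-- pv_equiv track=rewrite | github.com/domenicvacanti/Computer-Science-Fundamentals | DiscussionAssignments/ds3.py | hasFourConsecVowels
-- ===== SOURCE A (Python) =====
-- def hasFourConsecVowels(word):
--     result = False
--     i = 0
--     while (i + 3) < len(word):
--         if ((word[i] == 'a') or (word[i] == 'e') or (word[i] == 'i') or (word[i] == 'u')) and ((word[i+1] == 'a') or (word[i+1] == 'e') or (word[i+1]== 'i') or (word[i+1]== 'u')) and ((word[i+2] == 'a') or (word[i+2] == 'e') or (word[i+2]== 'i') or (word[i+2]== 'u')) and ((word[i+3] == 'a') or (word[i+3] == 'e') or (word[i+3]== 'i') or (word[i+3]== 'u')):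
--             result = True
--             break
--         i = i + 1
--     return result
-- ===== SOURCE B (Python) =====
-- def hasFourConsecVowels(word):
--     run = 0
--     for ch in word:
--         if ch in ('a', 'e', 'i', 'u'):
--             run += 1
--             if run == 4:
--                 return True
--         else:
--             run = 0
--     return False
-- ===== Notes on version B (the rewrite author's own statement) =====
-- stated objective: simpler
-- what changed: Replaced the fixed-offset index sliding-window (four word[i+k] lookups per position) with a single forward pass over the characters maintaining a run counter of consecutive vowels, returning early when the run reaches 4 (keeping A's exact vowel set {a,e,i,u}).
import Mathlib
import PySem

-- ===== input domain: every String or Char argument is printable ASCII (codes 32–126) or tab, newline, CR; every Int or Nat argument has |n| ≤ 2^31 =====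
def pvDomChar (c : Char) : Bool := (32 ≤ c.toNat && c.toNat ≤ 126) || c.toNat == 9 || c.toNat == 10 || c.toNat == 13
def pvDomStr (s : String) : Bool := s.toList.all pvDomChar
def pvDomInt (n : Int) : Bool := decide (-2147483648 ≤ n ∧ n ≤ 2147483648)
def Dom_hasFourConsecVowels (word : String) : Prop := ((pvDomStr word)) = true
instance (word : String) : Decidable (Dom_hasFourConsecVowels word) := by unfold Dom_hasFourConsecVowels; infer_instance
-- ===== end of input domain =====

-- B replaces A's fixed-offset four-index window scan by a single pass with a
-- run counter of consecutive vowels (objective: simpler; same vowel set {a,e,i,u} as A).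

-- ===== PORT A =====
def pvIsV (c : Char) : Bool := c == 'a' || c == 'e' || c == 'i' || c == 'u'

-- A's while loop: index i advances while i+3 < len; break on a vowel window.
def pvLoopA (cs : List Char) (i : Nat) : Bool :=
  if h : i + 3 < cs.length then
    if pvIsV (cs[i]'(by omega)) && pvIsV (cs[i+1]'(by omega)) &&
       pvIsV (cs[i+2]'(by omega)) && pvIsV (cs[i+3]'(by omega)) then true
    else pvLoopA cs (i+1)
  else false
termination_by cs.length - i

def hasFourConsecVowels (word : String) : Bool := pvLoopA word.toList 0

-- ===== PORT B =====
-- B's for loop: run counter of consecutive vowels, early return at 4.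
def pvLoopB : List Char → Nat → Bool
  | [], _ => false
  | c :: t, run =>
    if pvIsV c then
      if run + 1 == 4 then true else pvLoopB t (run + 1)
    else pvLoopB t 0

def hasFourConsecVowels_alt (word : String) : Bool := pvLoopB word.toList 0

-- ===== PRECONDITION & SPEC =====
def Spec_hasFourConsecVowels (word : String) (out : Bool) : Prop := out = hasFourConsecVowels_alt word
instance (word : String) (out : Bool) : Decidable (Spec_hasFourConsecVowels word out) := by unfold Spec_hasFourConsecVowels; infer_instance

-- ===== CLAIM (what is proved, stated in full; the proofs are below) =====
def Claim_equal_hasFourConsecVowels : Prop := ∀ (word : String), Dom_hasFourConsecVowels word → Spec_hasFourConsecVowels word (hasFourConsecVowels word)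

-- ===== LEMMAS AND PROOFS =====

-- Common characterisation: a window of four vowels exists somewhere in l.
def pvWin : List Char → Bool
  | a :: b :: c :: d :: t =>
      (pvIsV a && pvIsV b && pvIsV c && pvIsV d) || pvWin (b :: c :: d :: t)
  | _ => false
termination_by l => l.length

-- the first k characters of l exist and are all vowels
def pvPref : List Char → Nat → Bool
  | _, 0 => true
  | [], _+1 => false
  | c :: t, k+1 => pvIsV c && pvPref t k

theorem pvWin_short (l : List Char) (h : l.length < 4) : pvWin l = false := by
  rcases l with _ | ⟨a, _ | ⟨b, _ | ⟨c, _ | ⟨d, t⟩⟩⟩⟩ <;> simp [pvWin] at * <;> omega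

theorem pvPref_mono (l : List Char) (j k : Nat) (hjk : j ≤ k)
    (h : pvPref l k = true) : pvPref l j = true := by
  induction l generalizing j k with
  | nil =>
    cases k with
    | zero =>
      have : j = 0 := by omega
      subst this; simpa using h
    | succ k => simp [pvPref] at h
  | cons c t ih =>
    cases j with
    | zero => simp [pvPref]
    | succ j =>
      cases k with
      | zero => omega
      | succ k =>
        simp [pvPref] at h ⊢
        exact ⟨h.1, ih j k (by omega) h.2⟩

theorem pvPref_win (l : List Char) (h : pvPref l 4 = true) : pvWin l = true := by
  rcases l with _ | ⟨a, _ | ⟨b, _ | ⟨c, _ | ⟨d, t⟩⟩⟩⟩ <;>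
    simp [pvPref, pvWin] at * <;> tauto

theorem pvWin_cons (c : Char) (t : List Char) :
    pvWin (c :: t) = (pvPref (c :: t) 4 || pvWin t) := by
  rcases t with _ | ⟨b, _ | ⟨c2, _ | ⟨d, r⟩⟩⟩ <;>
    simp [pvWin, pvPref, Bool.and_assoc]

theorem pvLoopA_eq (cs : List Char) (i : Nat) : pvLoopA cs i = pvWin (cs.drop i) := by
  have key : ∀ n i, cs.length - i ≤ n → pvLoopA cs i = pvWin (cs.drop i) := by
    intro n
    induction n with
    | zero =>
      intro i hi
      rw [pvLoopA]
      have hlen : ¬ (i + 3 < cs.length) := by omega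
      rw [dif_neg hlen]
      rw [pvWin_short _ (by simp; omega)]
    | succ n ih =>
      intro i hi
      rw [pvLoopA]
      by_cases h : i + 3 < cs.length
      · rw [dif_pos h]
        rw [List.drop_eq_getElem_cons (show i < cs.length by omega),
            List.drop_eq_getElem_cons (show i+1 < cs.length by omega),
            List.drop_eq_getElem_cons (show i+2 < cs.length by omega),
            List.drop_eq_getElem_cons (show i+3 < cs.length by omega)]
        rw [pvWin]
        have hrec : pvLoopA cs (i+1) =
            pvWin (cs[i+1] :: cs[i+2] :: cs[i+3] :: cs.drop (i+4)) := by
          rw [ih (i+1) (by omega),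
              List.drop_eq_getElem_cons (show i+1 < cs.length by omega),
              List.drop_eq_getElem_cons (show i+2 < cs.length by omega),
              List.drop_eq_getElem_cons (show i+3 < cs.length by omega)]
        cases hw : (pvIsV (cs[i]'(by omega)) && pvIsV (cs[i+1]'(by omega)) &&
            pvIsV (cs[i+2]'(by omega)) && pvIsV (cs[i+3]'(by omega))) with
        | true => simp_all [Bool.and_assoc]
        | false => simp_all [Bool.and_assoc]
      · rw [dif_neg h]
        rw [pvWin_short _ (by simp; omega)]
  exact key (cs.length - i) i (le_refl _)

theorem pvLoopB_inv (l : List Char) (run : Nat) (hrun : run ≤ 3) :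
    pvLoopB l run = (pvPref l (4 - run) || pvWin l) := by
  induction l generalizing run with
  | nil =>
    have : 4 - run = (3 - run) + 1 := by omega
    simp [pvLoopB, pvWin, this, pvPref]
  | cons c t ih =>
    rw [pvLoopB]
    by_cases hv : pvIsV c = true
    · rw [if_pos hv]
      by_cases h3 : run = 3
      · subst h3
        simp [pvPref, hv]
      · have hne : ¬ (run + 1 == 4) = true := by simp; omega
        rw [if_neg hne, ih (run + 1) (by omega)]
        rw [show 4 - (run + 1) = 3 - run from by omega,
            show 4 - run = (3 - run) + 1 from by omega, pvWin_cons]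
        have hstep : pvPref (c :: t) ((3 - run) + 1) = pvPref t (3 - run) := by
          simp [pvPref, hv]
        rw [hstep]
        cases hp : pvPref t (3 - run) with
        | true => simp
        | false =>
          have hpf4 : pvPref (c :: t) 4 = false := by
            cases hq : pvPref (c :: t) 4 with
            | false => rfl
            | true =>
              have h3t : pvPref t 3 = true := by
                rw [show (4 : Nat) = 3 + 1 from rfl, pvPref] at hq
                simpa [hv] using hq
              have hmono := pvPref_mono t (3 - run) 3 (by omega) h3t
              rw [hp] at hmono
              exact absurd hmono (by simp)
          simp [hpf4]
    · rw [if_neg hv]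
      rw [ih 0 (by omega), pvWin_cons]
      have hp0 : pvPref (c :: t) (4 - run) = false := by
        rw [show 4 - run = (3 - run) + 1 from by omega, pvPref]
        simp [hv]
      have hp4 : pvPref (c :: t) 4 = false := by
        rw [show (4 : Nat) = 3 + 1 from rfl, pvPref]
        simp [hv]
      rw [hp0, hp4]
      cases hpt : pvPref t 4 with
      | false => simp
      | true => simp [pvPref_win t hpt]

-- ===== VERDICT (by name: the statement is the Claim_ definition above) =====
theorem hasFourConsecVowels_spec : Claim_equal_hasFourConsecVowels := by
  intro word _
  unfold Spec_hasFourConsecVowels hasFourConsecVowels hasFourConsecVowels_alt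
  rw [pvLoopA_eq, List.drop_zero, pvLoopB_inv _ 0 (by omega)]
  cases hp : pvPref word.toList 4 with
  | false => simp
  | true => simp [pvPref_win _ hp]
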